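-- pv_equiv track=rewrite | github.com/0general/coding-test | programmers/LV3/N으로 표현.py | solution
-- ===== SOURCE A (Python) =====
-- def solution(N, number):
--     num = [0, {N}]
--     for i in range(2, 9):  # 2~8
--         temp = {int(str(N)*i)}
--         for j in range(1, i//2+1):
--             for s1 in num[j]:
--                 for s2 in num[i-j]:
--                     temp.add(s1+s2)
--                     if s1-s2 != 0:
--                         temp.add(abs(s1-s2))
--                     temp.add(s1*s2)
--                     if s1//s2 != 0:
--                         temp.add(s1//s2)
--                     if s2//s1 != 0:
--                         temp.add(s2//s1)
--         num.append(temp)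
--     for su in range(1, 9):
--         if number in num[su]:
--             return su
--
--     return -1
-- ===== SOURCE B (Python) =====
-- def solution(N, number):
--     def reach(c):
--         # values expressible with exactly c copies of N
--         if c == 1:
--             return {N}
--         r = {int(str(N) * c)}
--         for j in range(1, c):
--             left, right = reach(j), reach(c - j)
--             for a in left:
--                 for b in right:
--                     r.add(a + b)
--                     if a > b:
--                         r.add(a - b)
--                     r.add(a * b)
--                     q = a // b
--                     if q:
--                         r.add(q)
--         return r
--
--     for su in range(1, 9):
--         if number in reach(su):
--             return su
--     return -1
-- ===== Notes on version B (the rewrite author's own statement) =====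
-- stated objective: alternative
-- what changed: Replaces the bottom-up num array that pairs levels j=1..i//2 with symmetric operations (abs difference, both floor divisions) by a top-down recursion reach(c) that unions over the full range j=1..c-1 with asymmetric operations (sum, positive difference, product, one floor division), searching levels 1..8 by recomputing reach(su).
import Mathlib
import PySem

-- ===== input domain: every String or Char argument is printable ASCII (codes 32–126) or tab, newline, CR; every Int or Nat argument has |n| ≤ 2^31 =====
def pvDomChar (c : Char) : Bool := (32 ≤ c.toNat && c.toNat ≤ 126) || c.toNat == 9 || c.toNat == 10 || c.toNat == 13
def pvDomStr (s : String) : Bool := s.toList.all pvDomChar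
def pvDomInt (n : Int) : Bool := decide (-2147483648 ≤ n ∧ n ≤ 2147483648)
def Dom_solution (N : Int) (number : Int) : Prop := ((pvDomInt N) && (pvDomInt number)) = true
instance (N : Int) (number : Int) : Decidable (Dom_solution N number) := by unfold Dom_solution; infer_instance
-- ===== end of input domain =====

-- B replaces the bottom-up num array (half-range pairing with abs/both divisions) by a
-- top-down recursion over the full range j = 1..c-1 with asymmetric operations; alternative
-- decomposition, not claimed faster.

-- Python 'set' model shared by both ports: the distinct elements as a list paired with a
-- hash index so that evaluation terminates quickly (the list alone makes every add a linear
-- scan); consumed only through membership, which is proved to agree with the list part.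
abbrev HSet := List Int × Std.HashSet Int

-- s.add(x)
def hadd (s : HSet) (x : Int) : HSet :=
  if s.2.contains x then s else (x :: s.1, s.2.insert x)

-- the set literal {x1, …}
def hofList (xs : List Int) : HSet := xs.foldl hadd ([], ∅)

-- shared helper: int(str(N)*c) (both Python sources contain this exact expression);
-- .getD 0 is never reached on inputs admitted by Pre_solution (str(N)*c parses for N ≥ 1)
def pvRepInt (N : Int) (c : Nat) : Int :=
  (PySem.Int.ofChars? (List.flatten (List.replicate c (PySem.Int.toChars N)))).getD 0

-- ===== PORT A =====
-- inner loop body of A: temp.add(s1+s2); if s1-s2 != 0: temp.add(abs(s1-s2)); temp.add(s1*s2);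
-- if s1//s2 != 0: temp.add(s1//s2); if s2//s1 != 0: temp.add(s2//s1)
def opsA (temp : HSet) (s1 s2 : Int) : HSet :=
  let t1 := hadd temp (s1 + s2)
  let t2 := if s1 - s2 ≠ 0 then hadd t1 |s1 - s2| else t1
  let t3 := hadd t2 (s1 * s2)
  let t4 := if PySem.Int.floordiv s1 s2 ≠ 0 then hadd t3 (PySem.Int.floordiv s1 s2) else t3
  if PySem.Int.floordiv s2 s1 ≠ 0 then hadd t4 (PySem.Int.floordiv s2 s1) else t4

-- the value of temp after the j/s1/s2 loops of iteration i
-- (iterating a Python set: the result is consumed only through set membership, so order-independent)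
def tempA (N : Int) (num : List HSet) (i : Int) : HSet :=
  (PySem.List.pyRange 1 (PySem.Int.floordiv i 2 + 1) 1).foldl
    (fun temp j =>
      (PySem.List.pyGetD num j ([], ∅)).1.foldl
        (fun temp s1 =>
          (PySem.List.pyGetD num (i - j) ([], ∅)).1.foldl (fun temp s2 => opsA temp s1 s2) temp)
        temp)
    (hofList [pvRepInt N i.toNat])

-- one iteration of the outer 'for i in range(2, 9)' loop: num.append(temp)
def stepA (N : Int) (num : List HSet) (i : Int) : List HSet :=
  num ++ [tempA N num i]

-- num after the outer loop; num[0] is the Python int 0, never read — placeholder empty set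
def numA (N : Int) : List HSet :=
  (PySem.List.pyRange 2 9 1).foldl (stepA N) [([], ∅), hofList [N]]

def solution (N : Int) (number : Int) : Int :=
  match (PySem.List.pyRange 1 9 1).find?
      (fun su => PySem.Set.contains (PySem.List.pyGetD (numA N) su ([], ∅)).1 number) with
  | some su => su
  | none => -1

-- ===== PORT B =====
-- inner loop body of B: r.add(a+b); if a > b: r.add(a-b); r.add(a*b); q = a//b; if q: r.add(q)
def opsB (r : HSet) (a b : Int) : HSet :=
  let r1 := hadd r (a + b)
  let r2 := if a > b then hadd r1 (a - b) else r1
  let r3 := hadd r2 (a * b)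
  let q := PySem.Int.floordiv a b
  if q ≠ 0 then hadd r3 q else r3

-- reach(c): 'for j in range(1, c)' ported as a fold over List.range (c-1) with j = k+1
def reach (N : Int) (c : Nat) : HSet :=
  if c = 1 then hofList [N]
  else
    (List.range (c - 1)).attach.foldl
      (fun r jk =>
        let j := jk.1 + 1
        let left := reach N j
        let right := reach N (c - j)
        left.1.foldl (fun r a => right.1.foldl (fun r b => opsB r a b) r) r)
      (hofList [pvRepInt N c])
termination_by c
decreasing_by
  all_goals (have h := jk.2; simp only [List.mem_range] at h; omega)

def solution_alt (N : Int) (number : Int) : Int :=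
  match (PySem.List.pyRange 1 9 1).find?
      (fun su => PySem.Set.contains (reach N su.toNat).1 number) with
  | some su => su
  | none => -1

-- ===== PRECONDITION & SPEC =====
-- A raises on every N ≤ 0 (ZeroDivisionError when N = 0, ValueError parsing int(str(N)*i) when N < 0)
def Pre_solution (N : Int) (number : Int) : Prop := 1 ≤ N
instance (N : Int) (number : Int) : Decidable (Pre_solution N number) := by
  unfold Pre_solution; infer_instance

def pvWitness_solution : Int × Int := (5, 12)

def Spec_solution (N : Int) (number : Int) (out : Int) : Prop := out = solution_alt N number
instance (N : Int) (number : Int) (out : Int) : Decidable (Spec_solution N number out) := by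
  unfold Spec_solution; infer_instance

-- ===== CLAIM (what is proved, stated in full; the proofs are below) =====
def Claim_equal_solution : Prop :=
  ∀ (N : Int) (number : Int), Dom_solution N number → Pre_solution N number →
    Spec_solution N number (solution N number)

-- ===== LEMMAS AND PROOFS =====

-- the hash index agrees with the element list
def hinv (s : HSet) : Prop := ∀ x : Int, s.2.contains x = true ↔ x ∈ s.1

lemma hinv_hadd {s : HSet} (h : hinv s) (a : Int) : hinv (hadd s a) := by
  unfold hinv at h ⊢
  unfold hadd
  split_ifs with hc
  · exact h
  · intro x
    simp only [Std.HashSet.contains_insert, Bool.or_eq_true, beq_iff_eq, List.mem_cons, h]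
    tauto

lemma mem_hadd {s : HSet} (h : hinv s) (a x : Int) :
    x ∈ (hadd s a).1 ↔ x ∈ s.1 ∨ x = a := by
  unfold hinv at h
  unfold hadd
  split_ifs with hc
  · constructor
    · exact Or.inl
    · rintro (hx | rfl)
      · exact hx
      · exact (h x).1 hc
  · simp only [List.mem_cons]
    tauto

lemma hinv_base : hinv (([], ∅) : HSet) := by
  unfold hinv
  intro x
  simp [Std.HashSet.contains_empty]

lemma hinv_hofList (xs : List Int) : hinv (hofList xs) := by
  unfold hofList
  have : ∀ (l : List Int) (init : HSet), hinv init → hinv (l.foldl hadd init) := by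
    intro l
    induction l with
    | nil => exact fun init h => h
    | cons y ys ih => exact fun init h => ih _ (hinv_hadd h y)
  exact this xs _ hinv_base

lemma mem_hofList_singleton (y x : Int) : x ∈ (hofList [y]).1 ↔ x = y := by
  unfold hofList
  simp only [List.foldl_cons, List.foldl_nil]
  rw [mem_hadd hinv_base]
  simp

-- the five candidate values A's inner body adds for the pair (s1, s2)
def PA (a b x : Int) : Prop :=
  x = a + b ∨ (a - b ≠ 0 ∧ x = |a - b|) ∨ x = a * b ∨
  (PySem.Int.floordiv a b ≠ 0 ∧ x = PySem.Int.floordiv a b) ∨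
  (PySem.Int.floordiv b a ≠ 0 ∧ x = PySem.Int.floordiv b a)

-- the candidate values B's inner body adds for the ordered pair (a, b)
def PB (a b x : Int) : Prop :=
  x = a + b ∨ (a > b ∧ x = a - b) ∨ x = a * b ∨
  (PySem.Int.floordiv a b ≠ 0 ∧ x = PySem.Int.floordiv a b)

-- 'f adds exactly the values satisfying Q, preserving the hash-list agreement'
def Good (f : HSet → HSet) (Q : Int → Prop) : Prop :=
  ∀ t, hinv t → hinv (f t) ∧ ∀ x, (x ∈ (f t).1 ↔ x ∈ t.1 ∨ Q x)

lemma good_hadd (v : Int) : Good (fun t => hadd t v) (fun x => x = v) :=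
  fun t ht => ⟨hinv_hadd ht v, fun x => mem_hadd ht v x⟩

lemma good_ite (c : Prop) [Decidable c] (v : Int) :
    Good (fun t => if c then hadd t v else t) (fun x => c ∧ x = v) := by
  intro t ht
  by_cases hc : c
  · simp only [if_pos hc]
    exact ⟨hinv_hadd ht v, fun x => by rw [mem_hadd ht v x]; tauto⟩
  · simp only [if_neg hc]
    exact ⟨ht, fun x => by tauto⟩

lemma good_comp {f g : HSet → HSet} {Q1 Q2 : Int → Prop} (hf : Good f Q1) (hg : Good g Q2) :
    Good (fun t => g (f t)) (fun x => Q1 x ∨ Q2 x) := by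
  intro t ht
  obtain ⟨hf1, hf2⟩ := hf t ht
  obtain ⟨hg1, hg2⟩ := hg (f t) hf1
  exact ⟨hg1, fun x => by rw [hg2 x, hf2 x]; tauto⟩

lemma mem_opsA {t : HSet} (h : hinv t) (a b : Int) :
    hinv (opsA t a b) ∧ ∀ x, (x ∈ (opsA t a b).1 ↔ x ∈ t.1 ∨ PA a b x) := by
  have hG := good_comp (good_hadd (a + b))
    (good_comp (good_ite (a - b ≠ 0) |a - b|)
      (good_comp (good_hadd (a * b))
        (good_comp (good_ite (PySem.Int.floordiv a b ≠ 0) (PySem.Int.floordiv a b))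
          (good_ite (PySem.Int.floordiv b a ≠ 0) (PySem.Int.floordiv b a)))))
  obtain ⟨h1, h2⟩ := hG t h
  refine ⟨h1, fun x => Iff.trans (h2 x) ?_⟩
  unfold PA
  tauto

lemma mem_opsB {t : HSet} (h : hinv t) (a b : Int) :
    hinv (opsB t a b) ∧ ∀ x, (x ∈ (opsB t a b).1 ↔ x ∈ t.1 ∨ PB a b x) := by
  have hG := good_comp (good_hadd (a + b))
    (good_comp (good_ite (a > b) (a - b))
      (good_comp (good_hadd (a * b))
        (good_ite (PySem.Int.floordiv a b ≠ 0) (PySem.Int.floordiv a b))))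
  obtain ⟨h1, h2⟩ := hG t h
  refine ⟨h1, fun x => Iff.trans (h2 x) ?_⟩
  unfold PB
  tauto

lemma mem_foldl_inv {β : Type} {g : HSet → β → HSet} {Q : β → Int → Prop}
    (hpres : ∀ t a, hinv t → hinv (g t a))
    (hg : ∀ t a, hinv t → ∀ x, (x ∈ (g t a).1 ↔ x ∈ t.1 ∨ Q a x)) :
    ∀ (l : List β) (init : HSet), hinv init →
      hinv (l.foldl g init) ∧
      ∀ x : Int, x ∈ (l.foldl g init).1 ↔ x ∈ init.1 ∨ ∃ a ∈ l, Q a x := by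
  intro l
  induction l with
  | nil =>
    intro init h
    exact ⟨h, fun x => by simp⟩
  | cons a l ih =>
    intro init h
    obtain ⟨ih1, ih2⟩ := ih (g init a) (hpres init a h)
    refine ⟨ih1, fun x => ?_⟩
    simp only [List.foldl_cons, ih2, hg init a h, List.mem_cons]
    constructor
    · rintro ((hx | hx) | ⟨b, hb, hQ⟩)
      · exact Or.inl hx
      · exact Or.inr ⟨a, Or.inl rfl, hx⟩
      · exact Or.inr ⟨b, Or.inr hb, hQ⟩
    · rintro (hx | ⟨b, (rfl | hb), hQ⟩)
      · exact Or.inl (Or.inl hx)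
      · exact Or.inl (Or.inr hQ)
      · exact Or.inr ⟨b, hb, hQ⟩

lemma mem_pairA (S T : List Int) {t : HSet} (h : hinv t) :
    hinv (S.foldl (fun t a => T.foldl (fun t b => opsA t a b) t) t) ∧
    ∀ x, x ∈ (S.foldl (fun t a => T.foldl (fun t b => opsA t a b) t) t).1 ↔
      x ∈ t.1 ∨ ∃ a ∈ S, ∃ b ∈ T, PA a b x := by
  exact mem_foldl_inv (Q := fun a x => ∃ b ∈ T, PA a b x)
    (fun t a ht => (mem_foldl_inv (Q := fun b x => PA a b x)
        (fun t b ht => (mem_opsA ht a b).1) (fun t b ht => (mem_opsA ht a b).2) T t ht).1)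
    (fun t a ht => (mem_foldl_inv (Q := fun b x => PA a b x)
        (fun t b ht => (mem_opsA ht a b).1) (fun t b ht => (mem_opsA ht a b).2) T t ht).2)
    S t h

lemma mem_pairB (S T : List Int) {t : HSet} (h : hinv t) :
    hinv (S.foldl (fun t a => T.foldl (fun t b => opsB t a b) t) t) ∧
    ∀ x, x ∈ (S.foldl (fun t a => T.foldl (fun t b => opsB t a b) t) t).1 ↔
      x ∈ t.1 ∨ ∃ a ∈ S, ∃ b ∈ T, PB a b x := by
  exact mem_foldl_inv (Q := fun a x => ∃ b ∈ T, PB a b x)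
    (fun t a ht => (mem_foldl_inv (Q := fun b x => PB a b x)
        (fun t b ht => (mem_opsB ht a b).1) (fun t b ht => (mem_opsB ht a b).2) T t ht).1)
    (fun t a ht => (mem_foldl_inv (Q := fun b x => PB a b x)
        (fun t b ht => (mem_opsB ht a b).1) (fun t b ht => (mem_opsB ht a b).2) T t ht).2)
    S t h

lemma PA_iff (a b x : Int) : PA a b x ↔ PB a b x ∨ PB b a x := by
  unfold PA PB
  rcases lt_trichotomy a b with h | h | h
  · have habs : |a - b| = b - a := by rw [abs_of_neg (show a - b < 0 by omega)]; ring
    rw [habs, Int.add_comm b a, Int.mul_comm b a]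
    have h1 : ¬ (b < a) := by omega
    have h2 : a - b ≠ 0 := by omega
    simp only [gt_iff_lt]
    tauto
  · subst h
    have h1 : ¬ (a < a) := by omega
    have h2 : ¬ (a - a ≠ 0) := by omega
    rw [Int.mul_comm a a]
    simp only [gt_iff_lt]
    tauto
  · have habs : |a - b| = a - b := abs_of_pos (show 0 < a - b by omega)
    rw [habs, Int.add_comm b a, Int.mul_comm b a]
    have h1 : ¬ (a < b) := by omega
    have h2 : a - b ≠ 0 := by omega
    simp only [gt_iff_lt]
    tauto

lemma mem_reach (N : Int) (c : Nat) (hc : 2 ≤ c) (x : Int) :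
    x ∈ (reach N c).1 ↔ x = pvRepInt N c ∨
      ∃ j : Nat, 1 ≤ j ∧ j < c ∧
        ∃ a b, a ∈ (reach N j).1 ∧ b ∈ (reach N (c - j)).1 ∧ PB a b x := by
  conv_lhs => rw [reach]
  rw [if_neg (by omega)]
  rw [(mem_foldl_inv
      (Q := fun (jk : {k // k ∈ List.range (c - 1)}) x =>
        ∃ a ∈ (reach N (jk.1 + 1)).1, ∃ b ∈ (reach N (c - (jk.1 + 1))).1, PB a b x)
      (fun t jk ht => (mem_pairB _ _ ht).1)
      (fun t jk ht => (mem_pairB _ _ ht).2)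
      _ _ (hinv_hofList _)).2 x]
  rw [mem_hofList_singleton]
  constructor
  · rintro (h | ⟨⟨k, hk⟩, _, a, ha, b, hb, hP⟩)
    · exact Or.inl h
    · exact Or.inr ⟨k + 1, by omega, by simp only [List.mem_range] at hk; omega, a, b, ha, hb, hP⟩
  · rintro (h | ⟨j, hj1, hj2, a, b, ha, hb, hP⟩)
    · exact Or.inl h
    · refine Or.inr ⟨⟨j - 1, by simp only [List.mem_range]; omega⟩, List.mem_attach _ _, ?_⟩
      have hj : j - 1 + 1 = j := by omega
      rw [hj]
      exact ⟨a, ha, b, hb, hP⟩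

lemma mem_tempA (N : Int) (num : List HSet) (i : Int) (x : Int) :
    x ∈ (tempA N num i).1 ↔ x = pvRepInt N i.toNat ∨
      ∃ j : Int, 1 ≤ j ∧ j < PySem.Int.floordiv i 2 + 1 ∧
        ∃ a b, a ∈ (PySem.List.pyGetD num j ([], ∅)).1 ∧
          b ∈ (PySem.List.pyGetD num (i - j) ([], ∅)).1 ∧ PA a b x := by
  unfold tempA
  rw [(mem_foldl_inv
      (Q := fun j x => ∃ a ∈ (PySem.List.pyGetD num j ([], ∅)).1,
        ∃ b ∈ (PySem.List.pyGetD num (i - j) ([], ∅)).1, PA a b x)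
      (fun t j ht => (mem_pairA _ _ ht).1)
      (fun t j ht => (mem_pairA _ _ ht).2)
      _ _ (hinv_hofList _)).2 x]
  rw [mem_hofList_singleton]
  simp only [PySem.List.mem_pyRange_one]
  constructor
  · rintro (h | ⟨j, ⟨hj1, hj2⟩, a, ha, b, hb, hP⟩)
    · exact Or.inl h
    · exact Or.inr ⟨j, hj1, hj2, a, b, ha, hb, hP⟩
  · rintro (h | ⟨j, hj1, hj2, a, b, ha, hb, hP⟩)
    · exact Or.inl h
    · exact Or.inr ⟨j, ⟨hj1, hj2⟩, a, ha, b, hb, hP⟩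

-- half-range pairing with symmetric ops covers the same values as full-range with asymmetric ops
lemma halfFull (R : Nat → List Int) (c : Nat) (hc : 2 ≤ c) (x : Int) :
    (∃ j : Nat, 1 ≤ j ∧ j ≤ c / 2 ∧ ∃ a b, a ∈ R j ∧ b ∈ R (c - j) ∧ PA a b x) ↔
    (∃ j : Nat, 1 ≤ j ∧ j < c ∧ ∃ a b, a ∈ R j ∧ b ∈ R (c - j) ∧ PB a b x) := by
  constructor
  · rintro ⟨j, hj1, hj2, a, b, ha, hb, hP⟩
    rcases (PA_iff a b x).1 hP with h | h
    · exact ⟨j, hj1, by omega, a, b, ha, hb, h⟩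
    · have hcc : c - (c - j) = j := by omega
      refine ⟨c - j, by omega, by omega, b, a, hb, ?_, h⟩
      rw [hcc]; exact ha
  · rintro ⟨j, hj1, hj2, a, b, ha, hb, hP⟩
    by_cases hle : j ≤ c / 2
    · exact ⟨j, hj1, hle, a, b, ha, hb, (PA_iff a b x).2 (Or.inl hP)⟩
    · have hcc : c - (c - j) = j := by omega
      refine ⟨c - j, by omega, by omega, b, a, hb, ?_, (PA_iff b a x).2 (Or.inr hP)⟩
      rw [hcc]; exact ha

-- A's num after the outer loop has run for i = 2 .. m
def numUpto (N : Int) (m : Nat) : List HSet :=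
  (PySem.List.pyRange 2 ((m : Int) + 1) 1).foldl (stepA N) [([], ∅), hofList [N]]

lemma numUpto_spec (N : Int) :
    ∀ m : Nat, 1 ≤ m →
      (numUpto N m).length = m + 1 ∧
      ∀ i : Nat, 1 ≤ i → i ≤ m → ∀ x : Int,
        x ∈ ((numUpto N m).getD i ([], ∅)).1 ↔ x ∈ (reach N i).1 := by
  intro m
  induction m with
  | zero => omega
  | succ m ih =>
    intro _
    by_cases hm : m = 0
    · subst hm
      have hnil : numUpto N 1 = [([], ∅), hofList [N]] := by
        unfold numUpto
        rw [PySem.List.pyRange_one_eq_nil (by norm_num)]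
        rfl
      refine ⟨by rw [hnil]; rfl, ?_⟩
      intro i hi1 hi2 x
      have hi : i = 1 := by omega
      subst hi
      rw [hnil]
      conv_rhs => rw [reach]
      simp
    · have hm1 : 1 ≤ m := by omega
      obtain ⟨ihlen, ihmem⟩ := ih hm1
      have key : numUpto N (m + 1) = stepA N (numUpto N m) ((m : Int) + 1) := by
        unfold numUpto
        have hcast : ((m + 1 : Nat) : Int) + 1 = ((m : Int) + 1) + 1 := by push_cast; ring
        rw [hcast, PySem.List.pyRange_one_succ_right (by omega)]
        rw [List.foldl_append]
        rfl
      rw [key]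
      unfold stepA
      have hfd : PySem.Int.floordiv ((m : Int) + 1) 2 = (((m + 1) / 2 : Nat) : Int) := by
        have h1 : ((m : Int) + 1) = ((m + 1 : Nat) : Int) := by push_cast; ring
        rw [h1]
        exact_mod_cast PySem.Int.floordiv_natCast (m + 1) 2
      refine ⟨by rw [List.length_append, ihlen]; rfl, ?_⟩
      intro i hi1 hi2 x
      by_cases hile : i ≤ m
      · rw [List.getD_append _ _ _ _ (by omega)]
        exact ihmem i hi1 hile x
      · have hieq : i = m + 1 := by omega
        subst hieq
        have hgl : (numUpto N m ++ [tempA N (numUpto N m) ((m : Int) + 1)]).getD (m + 1) ([], ∅) =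
            tempA N (numUpto N m) ((m : Int) + 1) := by
          rw [List.getD_eq_getElem?_getD, List.getElem?_append_right (by omega), ihlen]
          simp
        rw [hgl]
        rw [mem_tempA, mem_reach N (m + 1) (by omega)]
        have htn : ((m : Int) + 1).toNat = m + 1 := by omega
        constructor
        · rintro (h | ⟨j, hj1, hj2, a, b, ha, hb, hP⟩)
          · left; rw [htn] at h; exact h
          · right
            rw [hfd] at hj2
            set jn := j.toNat with hjn
            have hjcast : j = (jn : Int) := by omega
            have hjle : jn ≤ (m + 1) / 2 := by omega
            have hjm : (m + 1) / 2 ≤ m := by omega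
            apply (halfFull (fun j => (reach N j).1) (m + 1) (by omega) x).1
            refine ⟨jn, by omega, hjle, a, b, ?_, ?_, hP⟩
            · rw [hjcast] at ha
              rw [PySem.List.pyGetD_natCast] at ha
              exact (ihmem jn (by omega) (by omega) a).1 ha
            · have hsub : (m : Int) + 1 - j = ((m + 1 - jn : Nat) : Int) := by omega
              rw [hsub, PySem.List.pyGetD_natCast] at hb
              exact (ihmem (m + 1 - jn) (by omega) (by omega) b).1 hb
        · rintro (h | hfull)
          · left; rw [htn]; exact h
          · right
            obtain ⟨jn, hj1, hjle, a, b, ha, hb, hP⟩ :=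
              (halfFull (fun j => (reach N j).1) (m + 1) (by omega) x).2 hfull
            have hjm : (m + 1) / 2 ≤ m := by omega
            refine ⟨(jn : Int), by omega, ?_, a, b, ?_, ?_, hP⟩
            · rw [hfd]; omega
            · rw [PySem.List.pyGetD_natCast]
              exact (ihmem jn (by omega) (by omega) a).2 ha
            · have hsub : (m : Int) + 1 - (jn : Int) = ((m + 1 - jn : Nat) : Int) := by omega
              rw [hsub, PySem.List.pyGetD_natCast]
              exact (ihmem (m + 1 - jn) (by omega) (by omega) b).2 hb

lemma find?_congr' (p q : Int → Bool) :
    ∀ l : List Int, (∀ a ∈ l, p a = q a) → l.find? p = l.find? q := by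
  intro l
  induction l with
  | nil => simp
  | cons a l ih =>
    intro h
    simp only [List.find?_cons]
    rw [h a (List.mem_cons_self)]
    cases hqa : q a
    · exact ih fun b hb => h b (List.mem_cons_of_mem _ hb)
    · rfl

theorem solution_eq_alt (N number : Int) : solution N number = solution_alt N number := by
  unfold solution solution_alt
  have hnum : numA N = numUpto N 8 := by unfold numA numUpto; norm_num
  have hpq : ∀ su ∈ PySem.List.pyRange 1 9 1,
      (PySem.Set.contains (PySem.List.pyGetD (numA N) su ([], ∅)).1 number) =
      (PySem.Set.contains (reach N su.toNat).1 number) := by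
    intro su hsu
    rw [PySem.List.mem_pyRange_one] at hsu
    rw [Bool.eq_iff_iff, PySem.Set.contains_iff, PySem.Set.contains_iff, hnum]
    have hc : su = ((su.toNat : Nat) : Int) := by omega
    rw [hc, PySem.List.pyGetD_natCast]
    exact (numUpto_spec N 8 (by norm_num)).2 su.toNat (by omega) (by omega) number
  rw [find?_congr' _ _ _ hpq]

-- ===== VERDICT (by name: the statement is the Claim_ definition above) =====
theorem solution_spec : Claim_equal_solution := by
  intro N number _ _
  unfold Spec_solution
  exact solution_eq_alt N number
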